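-- pv_equiv track=rewrite | github.com/nip403/Sorting-Algorithms | Strand.py | strand
-- ===== SOURCE A (Python) =====
-- def strand(arr):
--     i = 0
--     s = [arr.pop(0)]
--
--     while i < len(arr):
--         if arr[i] > s[-1]:
--             s.append(arr.pop(i))
--         else:
--             i += 1
--
--     return s
-- ===== SOURCE B (Python) =====
-- def strand(arr):
--     s = [arr[0]]
--     cur = arr[0]
--     leftovers = []
--     for x in arr[1:]:
--         if x > cur:
--             s.append(x)
--             cur = x
--         else:
--             leftovers.append(x)
--     arr[:] = leftovers
--     return s
-- ===== Notes on version B (the rewrite author's own statement) =====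
-- stated objective: faster
-- what changed: Replaces the while-loop with repeated arr.pop(i) shifting by a single pass that appends each element either to the strand or to a leftovers list, then writes leftovers back with arr[:]=leftovers.
import Mathlib
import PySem

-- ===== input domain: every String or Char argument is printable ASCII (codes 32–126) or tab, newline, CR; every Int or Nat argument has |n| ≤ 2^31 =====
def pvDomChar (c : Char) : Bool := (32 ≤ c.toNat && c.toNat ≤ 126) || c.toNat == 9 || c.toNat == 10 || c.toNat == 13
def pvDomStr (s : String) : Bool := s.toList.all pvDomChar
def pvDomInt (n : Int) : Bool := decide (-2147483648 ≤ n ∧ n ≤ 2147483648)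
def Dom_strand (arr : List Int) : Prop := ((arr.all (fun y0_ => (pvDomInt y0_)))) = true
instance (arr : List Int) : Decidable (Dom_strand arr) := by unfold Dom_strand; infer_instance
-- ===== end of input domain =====

-- B replaces A's quadratic pop(i)-shifting while-loop by one linear pass splitting into
-- strand and leftovers (objective: faster). Both Pythons mutate arr identically; the
-- equivalence proved here is about the return value.

-- ===== PORT A =====
-- the while-loop: state is (arr, i, s); arr.pop(i) = take i ++ drop (i+1); s is nonempty
-- throughout (it starts as [arr.pop(0)]), so s[-1] is rendered as getLastD 0.
def strandLoopA (arr : List Int) (i : Nat) (s : List Int) : List Int :=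
  if h : i < arr.length then
    if arr[i] > s.getLastD 0 then
      strandLoopA (arr.take i ++ arr.drop (i+1)) i (s ++ [arr[i]])
    else
      strandLoopA arr (i+1) s
  else s
termination_by arr.length - i
decreasing_by
  · simp_all [List.length_append, List.length_take, List.length_drop]; omega
  · omega

def strand (arr : List Int) : List Int :=
  match arr with
  | [] => []          -- Python raises IndexError on arr.pop(0); excluded by Pre_strand
  | a :: rest => strandLoopA rest 0 [a]

-- ===== PORT B =====
-- one pass over arr[1:], keeping cur = s[-1]; leftovers is what B writes back into arr
-- (a mutation the return value does not depend on, so the port drops it).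
def strandLoopB (rest : List Int) (cur : Int) (s : List Int) : List Int :=
  match rest with
  | [] => s
  | x :: xs => if x > cur then strandLoopB xs x (s ++ [x]) else strandLoopB xs cur s

def strand_alt (arr : List Int) : List Int :=
  match arr with
  | [] => []          -- arr[0] raises IndexError; excluded by Pre_strand
  | a :: rest => strandLoopB rest a [a]

-- ===== PRECONDITION & SPEC =====
-- Pre_ excludes only the empty list, on which A raises IndexError (arr.pop(0)).
def Pre_strand (arr : List Int) : Prop := arr ≠ []
instance (arr : List Int) : Decidable (Pre_strand arr) := by unfold Pre_strand; infer_instance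
def pvWitness_strand : List Int := [3, 1, 4, 2]

def Spec_strand (arr : List Int) (out : List Int) : Prop := out = strand_alt arr
instance (arr : List Int) (out : List Int) : Decidable (Spec_strand arr out) := by unfold Spec_strand; infer_instance

-- ===== CLAIM (what is proved, stated in full; the proofs are below) =====
def Claim_equal_strand : Prop := ∀ (arr : List Int), Dom_strand arr → Pre_strand arr → Spec_strand arr (strand arr)

-- ===== LEMMAS AND PROOFS =====

lemma strandLoopA_eq (arr : List Int) (i : Nat) (s : List Int) :
    strandLoopA arr i s = strandLoopB (arr.drop i) (s.getLastD 0) s := by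
  by_cases h : i < arr.length
  · have hd : arr.drop i = arr[i] :: arr.drop (i+1) := List.drop_eq_getElem_cons h
    rw [strandLoopA, dif_pos h, hd]
    by_cases hc : arr[i] > s.getLastD 0
    · rw [if_pos hc, strandLoopB, if_pos hc, strandLoopA_eq]
      congr 1
      · rw [List.drop_append_of_le_length (by simp [List.length_take]; omega)]
        simp
      · simp
    · rw [if_neg hc, strandLoopB, if_neg hc, strandLoopA_eq]
  · rw [strandLoopA, dif_neg h, List.drop_eq_nil_of_le (by omega), strandLoopB]
termination_by arr.length - i
decreasing_by
  · simp_all [List.length_append, List.length_take, List.length_drop]; omega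
  · omega

-- ===== VERDICT (by name: the statement is the Claim_ definition above) =====
theorem strand_spec : Claim_equal_strand := by
  intro arr _ hpre
  unfold Spec_strand
  match arr with
  | [] => exact absurd rfl hpre
  | a :: rest =>
      show strandLoopA rest 0 [a] = strandLoopB rest a [a]
      rw [strandLoopA_eq]; rfl
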